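-- pv_equiv track=rewrite | github.com/jmocay/solving_problems | array_find2unique_items.py | find2unique
-- ===== SOURCE A (Python) =====
-- def find2unique(arr):
--     unqs = {}
--     for k in arr:
--         if k in unqs:
--             del unqs[k]
--         else:
--             unqs[k] = None
--     return [k for k in unqs.keys()]
-- ===== SOURCE B (Python) =====
-- def find2unique(arr):
--     counts = {}
--     for k in arr:
--         counts[k] = counts.get(k, 0) + 1
--     odds = [k for k in dict.fromkeys(reversed(arr)) if counts[k] % 2 == 1]
--     odds.reverse()
--     return odds
-- ===== Notes on version B (the rewrite author's own statement) =====
-- stated objective: alternative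
-- what changed: Replaces the single-pass dict membership toggle with a two-phase tabulation: build a count table, then filter the last-occurrence dedup of the array by odd count and reverse, so surviving keys keep A's last-occurrence order.
import Mathlib
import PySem

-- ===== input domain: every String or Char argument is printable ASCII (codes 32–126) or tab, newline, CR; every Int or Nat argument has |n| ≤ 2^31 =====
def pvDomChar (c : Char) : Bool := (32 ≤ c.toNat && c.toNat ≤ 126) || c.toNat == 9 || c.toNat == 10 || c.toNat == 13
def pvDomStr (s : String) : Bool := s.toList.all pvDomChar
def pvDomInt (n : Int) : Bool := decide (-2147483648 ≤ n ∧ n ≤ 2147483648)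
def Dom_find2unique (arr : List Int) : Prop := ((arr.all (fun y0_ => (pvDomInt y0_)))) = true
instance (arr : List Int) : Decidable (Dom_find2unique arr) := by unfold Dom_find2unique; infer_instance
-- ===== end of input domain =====

-- B replaces A's single-pass dict membership toggle by a count table plus a filtered
-- dedup pass over the reversed list (same result: odd-count items in last-occurrence order).


-- ===== PORT A =====
def find2unique (arr : List Int) : List Int :=
  (arr.foldl
      (fun unqs k => if unqs.contains k then unqs.erase k else unqs.insert k (none : Option Int))
      (PySem.Dict.empty : PySem.Dict Int (Option Int))).keys

-- ===== PORT B =====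
def find2unique_alt (arr : List Int) : List Int :=
  let counts : PySem.Dict Int Int :=
    arr.foldl (fun d k => d.insert k (d.getD k 0 + 1)) PySem.Dict.empty
  -- counts[k]: every k the comprehension sees occurs in arr, so the lookup is counts.getD k 0
  let odds := (PySem.List.dedup arr.reverse).filter
      (fun k => PySem.Int.mod (counts.getD k 0) 2 == 1)
  odds.reverse

-- ===== PRECONDITION & SPEC =====
def Spec_find2unique (arr : List Int) (out : List Int) : Prop := out = find2unique_alt arr
instance (arr : List Int) (out : List Int) : Decidable (Spec_find2unique arr out) := by unfold Spec_find2unique; infer_instance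

-- ===== CLAIM (what is proved, stated in full; the proofs are below) =====
def Claim_equal_find2unique : Prop := ∀ (arr : List Int), Dom_find2unique arr → Spec_find2unique arr (find2unique arr)

-- ===== LEMMAS AND PROOFS =====

-- A's loop step, abbreviated for the proofs
def pvStep (d : PySem.Dict Int (Option Int)) (k : Int) : PySem.Dict Int (Option Int) :=
  if d.contains k then d.erase k else d.insert k (none : Option Int)

-- map fst commutes with a filter that only looks at fst
lemma map_fst_filter (l : List (Int × Option Int)) (p : Int → Bool) :
    (l.filter (fun q => p q.1)).map Prod.fst = (l.map Prod.fst).filter p := by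
  induction l with
  | nil => rfl
  | cons a t ih => by_cases h : p a.1 <;> simp [h, ih]

-- keys after one toggle step
lemma keys_pvStep (d : PySem.Dict Int (Option Int)) (k : Int) :
    (pvStep d k).keys =
      if k ∈ d.keys then d.keys.filter (fun y => !(y == k)) else d.keys ++ [k] := by
  by_cases h : d.contains k = true
  · rw [pvStep, if_pos h, if_pos ((PySem.Dict.contains_iff_mem_keys d k).mp h)]
    simp only [PySem.Dict.erase, PySem.Dict.keys]
    exact map_fst_filter d.items (fun y => !(y == k))
  · have h' : d.contains k = false := by simpa using h
    rw [pvStep, if_neg (by simp [h']),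
      if_neg (fun hm => by simp [(PySem.Dict.contains_iff_mem_keys d k).mpr hm] at h'),
      PySem.Dict.keys_insert_of_not_contains d _ h']

-- Set.ofList over an arbitrary starting set
lemma foldl_add_eq (l : List Int) (s : PySem.Set Int) :
    List.foldl PySem.Set.add s l =
      s ++ (PySem.List.dedup l).filter (fun y => !(s.contains y)) := by
  induction l generalizing s with
  | nil => simp [PySem.List.dedup, PySem.Set.ofList]
  | cons x t ih =>
    have hded : PySem.List.dedup (x :: t) =
        PySem.Set.add PySem.Set.empty x ++
          (PySem.List.dedup t).filter (fun y => !((PySem.Set.add PySem.Set.empty x).contains y)) := by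
      simpa [PySem.List.dedup, PySem.Set.ofList] using ih (PySem.Set.add PySem.Set.empty x)
    have hax : PySem.Set.add (PySem.Set.empty : PySem.Set Int) x = [x] := by
      simp [PySem.Set.add, PySem.Set.empty, PySem.Set.contains]
    rw [List.foldl_cons, ih (PySem.Set.add s x), hded, hax]
    by_cases hc : s.contains x = true
    · have hmem : x ∈ s := by simpa [PySem.Set.contains, List.contains_iff_mem] using hc
      have hadd : PySem.Set.add s x = s := by simp [PySem.Set.add, PySem.Set.contains, hmem]
      rw [hadd]
      simp only [List.filter_append, List.filter_filter]
      have h1 : List.filter (fun y => !(s.contains y)) [x] = [] := by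
        simp [List.filter, PySem.Set.contains, hmem]
      rw [h1, List.nil_append]
      refine congrArg (s ++ ·) (List.filter_congr ?_)
      intro a _
      by_cases hax' : a = x
      · subst hax'; simp [PySem.Set.contains, hmem]
      · simp [PySem.Set.contains, hax']
    · have hc' : s.contains x = false := by simpa using hc
      have hnot : x ∉ s := by simpa [PySem.Set.contains, List.contains_iff_mem] using hc'
      have hadd : PySem.Set.add s x = s ++ [x] := by simp [PySem.Set.add, PySem.Set.contains, hnot]
      rw [hadd]
      simp only [List.filter_append, List.filter_filter, List.append_assoc]
      have h1 : List.filter (fun y => !(s.contains y)) [x] = [x] := by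
        simp [List.filter, PySem.Set.contains, hnot]
      rw [h1]
      refine congrArg (s ++ ·) (congrArg ([x] ++ ·) (List.filter_congr ?_))
      intro a _
      by_cases hax' : a = x
      · subst hax'; simp [PySem.Set.contains]
      · simp [PySem.Set.contains, hax']

-- Python dict.fromkeys: dedup of a cons
lemma dedup_cons (x : Int) (l : List Int) :
    PySem.List.dedup (x :: l) = x :: (PySem.List.dedup l).filter (fun y => !(y == x)) := by
  have h0 := foldl_add_eq l ([x] : PySem.Set Int)
  have hax : PySem.Set.add (PySem.Set.empty : PySem.Set Int) x = [x] := by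
    simp [PySem.Set.add, PySem.Set.empty, PySem.Set.contains]
  have hd : PySem.List.dedup (x :: l) = List.foldl PySem.Set.add [x] l := by
    rw [PySem.List.dedup, PySem.Set.ofList, List.foldl_cons, hax]
  rw [hd, h0]
  refine congrArg (fun t => x :: t) (List.filter_congr ?_)
  intro a _
  simp [PySem.Set.contains, beq_eq_decide]

-- the Nat-count predicate the two programs agree on
def pvOdd (arr : List Int) (k : Int) : Bool := decide (arr.count k % 2 = 1)

-- B's value, expressed through List.count
lemma alt_eq (arr : List Int) :
    find2unique_alt arr = ((PySem.List.dedup arr.reverse).filter (pvOdd arr)).reverse := by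
  unfold find2unique_alt
  rw [PySem.Dict.foldl_insert_getD_add_one_eq_counter]
  refine congrArg List.reverse (List.filter_congr ?_)
  intro a _
  rw [PySem.Dict.getD_counter, PySem.Int.mod_eq_emod_of_pos (by norm_num)]
  unfold pvOdd
  have hcast : ((arr.count a : Int) % 2) = ((arr.count a % 2 : Nat) : Int) := by norm_cast
  rw [hcast]
  rcases Nat.mod_two_eq_zero_or_one (arr.count a) with h | h <;> simp [h]

-- membership in B's value
lemma mem_B (arr : List Int) (x : Int) :
    x ∈ ((PySem.List.dedup arr.reverse).filter (pvOdd arr)).reverse ↔ arr.count x % 2 = 1 := by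
  constructor
  · intro h
    simp only [List.mem_reverse, List.mem_filter] at h
    simpa [pvOdd] using h.2
  · intro h
    have hx : x ∈ arr := by
      refine List.count_pos_iff.mp ?_
      omega
    simp only [List.mem_reverse, List.mem_filter, PySem.List.mem_dedup]
    exact ⟨hx, by simpa [pvOdd] using h⟩
  

-- counts after appending one element
lemma count_snoc (arr : List Int) (x a : Int) :
    (arr ++ [x]).count a = arr.count a + (if x = a then 1 else 0) := by
  simp [List.count_append, List.count_singleton]

-- the main invariant: A's dict keys are exactly B's value
lemma key_lemma (arr : List Int) :
    (arr.foldl pvStep (PySem.Dict.empty : PySem.Dict Int (Option Int))).keys =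
      ((PySem.List.dedup arr.reverse).filter (pvOdd arr)).reverse := by
  induction arr using List.reverseRecOn with
  | nil => simp [PySem.List.dedup, PySem.Set.ofList]
  | append_singleton arr x ih =>
    rw [List.foldl_append, List.foldl_cons, List.foldl_nil, keys_pvStep, ih]
    have hrev : (arr ++ [x]).reverse = x :: arr.reverse := by simp
    rw [hrev, dedup_cons]
    by_cases hodd : arr.count x % 2 = 1
    · -- x currently in the dict: erased; new count even
      rw [if_pos ((mem_B arr x).mpr hodd)]
      have hpx : pvOdd (arr ++ [x]) x = false := by
        simp [pvOdd]; omega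
      rw [List.filter_cons, if_neg (by simp [hpx])]
      rw [List.filter_reverse]
      simp only [List.filter_filter]
      refine congrArg List.reverse (List.filter_congr ?_)
      intro a _
      by_cases hax : a = x
      · subst hax; simp [pvOdd, hodd]
      · have hcnt : (arr ++ [x]).count a = arr.count a := by
          rw [count_snoc]; simp [Ne.symm hax]
        simp [pvOdd, hcnt, Bool.and_comm]
    · -- x not in the dict: appended; new count odd
      have hxK : x ∉ ((PySem.List.dedup arr.reverse).filter (pvOdd arr)).reverse := by
        intro h; exact hodd ((mem_B arr x).mp h)
      rw [if_neg hxK]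
      have hpx : pvOdd (arr ++ [x]) x = true := by
        simp [pvOdd]; omega
      rw [List.filter_cons, if_pos hpx, List.reverse_cons, List.filter_filter]
      refine congrArg (· ++ [x]) (congrArg List.reverse (List.filter_congr ?_))
      intro a _
      by_cases hax : a = x
      · subst hax
        have hpa : pvOdd arr a = false := by simpa [pvOdd] using hodd
        simp [hpa]
      · have hcnt : (arr ++ [x]).count a = arr.count a := by
          rw [count_snoc]; simp [Ne.symm hax]
        simp [pvOdd, hcnt, hax]

-- ===== VERDICT (by name: the statement is the Claim_ definition above) =====
theorem find2unique_spec : Claim_equal_find2unique := by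
  intro arr _
  show find2unique arr = find2unique_alt arr
  rw [alt_eq, ← key_lemma]
  rfl
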